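-- pv_equiv track=rewrite | github.com/mpraiser/Pyeetcode | main/1744.py | canEat
-- ===== SOURCE A (Python) =====
-- from typing import List, Tuple
-- from itertools import accumulate
--
-- def canEat(candiesCount: List[int], queries: List[List[int]]) -> List[bool]:
--     index = list(accumulate(candiesCount))
--
--     def can(f_type, f_day, cap) -> bool:
--         # total number of eat on f_day
--         min_eat = f_day + 1
--         max_eat = (f_day + 1) * cap
--
--         # remember to plus 1: from index i to number i
--         min_fav = index[f_type-1] + 1 if f_type >= 1 else 0
--         max_fav = index[f_type]
--         return min_eat <= max_fav and max_eat >= min_fav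
--
--     results = [can(*q) for q in queries]
--     return results
-- ===== SOURCE B (Python) =====
-- def canEat(candiesCount, queries):
--     # No precomputed prefix-sum table: each query scans candiesCount directly.
--     results = []
--     for f_type, f_day, cap in queries:
--         total = 0
--         for i in range(f_type + 1):
--             total += candiesCount[i]
--         min_fav = total - candiesCount[f_type] + 1 if f_type >= 1 else 0
--         results.append(f_day + 1 <= total and (f_day + 1) * cap >= min_fav)
--     return results
-- ===== Notes on version B (the rewrite author's own statement) =====
-- stated objective: alternative
-- what changed: Drops A's precomputed accumulate prefix-sum table; each query recomputes the favorite-candy boundaries by a direct scan of candiesCount up to f_type, appending results with an explicit loop and accumulator.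
-- outside the precondition, e.g. on canEat([2, 3], [[-1, 0, 10]]): A returns [True], B returns [False]
import Mathlib
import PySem

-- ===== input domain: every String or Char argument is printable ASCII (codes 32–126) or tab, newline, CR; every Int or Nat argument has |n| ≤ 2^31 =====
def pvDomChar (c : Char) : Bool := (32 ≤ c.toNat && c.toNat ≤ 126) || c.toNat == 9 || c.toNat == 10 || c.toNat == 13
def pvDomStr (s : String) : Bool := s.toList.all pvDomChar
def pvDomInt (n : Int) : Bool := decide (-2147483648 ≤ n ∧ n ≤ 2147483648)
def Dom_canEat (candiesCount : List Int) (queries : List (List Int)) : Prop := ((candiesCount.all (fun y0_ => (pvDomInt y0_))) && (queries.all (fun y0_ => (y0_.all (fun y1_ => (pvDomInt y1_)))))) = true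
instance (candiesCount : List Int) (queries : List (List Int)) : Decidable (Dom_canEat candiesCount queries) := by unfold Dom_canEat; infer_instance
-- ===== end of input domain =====

-- B drops A's accumulate prefix-sum table and scans candiesCount per query instead (alternative, not faster).

-- ===== PORT A =====
-- list(accumulate(candiesCount)) with running sum 'run'
def pyAccumulate (run : Int) : List Int → List Int
  | [] => []
  | x :: xs => (run + x) :: pyAccumulate (run + x) xs

-- the inner 'can(f_type, f_day, cap)' closure over 'index'
def canEat_can (index : List Int) (f_type f_day cap : Int) : Bool :=
  let min_eat := f_day + 1
  let max_eat := (f_day + 1) * cap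
  let min_fav := if 1 ≤ f_type then PySem.List.pyGetD index (f_type - 1) 0 + 1 else 0
  let max_fav := PySem.List.pyGetD index f_type 0
  decide (min_eat ≤ max_fav) && decide (max_eat ≥ min_fav)

def canEat (candiesCount : List Int) (queries : List (List Int)) : List Bool :=
  let index := pyAccumulate 0 candiesCount
  queries.map (fun q =>
    canEat_can index (PySem.List.pyGetD q 0 0) (PySem.List.pyGetD q 1 0) (PySem.List.pyGetD q 2 0))

-- ===== PORT B =====
def canEat_alt (candiesCount : List Int) (queries : List (List Int)) : List Bool :=
  queries.foldl (fun results q =>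
    let f_type := PySem.List.pyGetD q 0 0
    let f_day := PySem.List.pyGetD q 1 0
    let cap := PySem.List.pyGetD q 2 0
    let total := (PySem.List.pyRange 0 (f_type + 1) 1).foldl
      (fun t i => t + PySem.List.pyGetD candiesCount i 0) 0
    let min_fav := if 1 ≤ f_type then total - PySem.List.pyGetD candiesCount f_type 0 + 1 else 0
    results ++ [decide (f_day + 1 ≤ total) && decide ((f_day + 1) * cap ≥ min_fav)]) []

-- ===== PRECONDITION & SPEC =====
-- Pre_ restricts to the problem's natural domain (each query is [favoriteType, favoriteDay, dailyCap]
-- with 0 ≤ favoriteType < len(candiesCount)): outside it A raises (wrong query arity, favoriteType out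
-- of Python-index range) or, for in-range negative favoriteType, returns a value that is an accident of
-- Python's negative-index wraparound.
def Pre_canEat (candiesCount : List Int) (queries : List (List Int)) : Prop :=
  ∀ q ∈ queries, q.length = 3 ∧ 0 ≤ q.getD 0 0 ∧ q.getD 0 0 < (candiesCount.length : Int)
instance (candiesCount : List Int) (queries : List (List Int)) : Decidable (Pre_canEat candiesCount queries) := by unfold Pre_canEat; infer_instance
def pvWitness_canEat : List Int × List (List Int) := ([2, 3], [[0, 0, 1], [1, 2, 2]])

def Spec_canEat (candiesCount : List Int) (queries : List (List Int)) (out : List Bool) : Prop := out = canEat_alt candiesCount queries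
instance (candiesCount : List Int) (queries : List (List Int)) (out : List Bool) : Decidable (Spec_canEat candiesCount queries out) := by unfold Spec_canEat; infer_instance

-- ===== CLAIM (what is proved, stated in full; the proofs are below) =====
def Claim_equal_canEat : Prop := ∀ (candiesCount : List Int) (queries : List (List Int)), Dom_canEat candiesCount queries → Pre_canEat candiesCount queries → Spec_canEat candiesCount queries (canEat candiesCount queries)

-- ===== LEMMAS AND PROOFS =====

-- the k-th entry of accumulate is run + sum of the first k+1 elements
theorem pyAccumulate_getD (run : Int) (xs : List Int) (k : Nat) (hk : k < xs.length) :
    (pyAccumulate run xs).getD k 0 = run + (xs.take (k + 1)).sum := by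
  induction xs generalizing run k with
  | nil => simp at hk
  | cons x xs ih =>
    cases k with
    | zero => simp [pyAccumulate]
    | succ k =>
      simp only [pyAccumulate, List.getD_cons_succ, List.take_succ_cons, List.sum_cons]
      rw [ih (run + x) k (by simpa using hk)]
      ring

-- B's per-query scan computes the same prefix sum
theorem scan_sum (xs : List Int) (k : Nat) (hk : k < xs.length) :
    (PySem.List.pyRange 0 ((k : Int) + 1) 1).foldl
      (fun t i => t + PySem.List.pyGetD xs i 0) 0 = (xs.take (k + 1)).sum := by
  induction k with
  | zero =>
    rw [show (((0 : Nat) : Int) + 1) = 0 + 1 by norm_num, PySem.List.pyRange_one_singleton]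
    cases xs with
    | nil => simp at hk
    | cons x xs => simp [PySem.List.pyGetD_zero_cons]
  | succ k ih =>
    rw [show (((k : Nat) + 1 : Nat) : Int) + 1 = ((k : Int) + 1) + 1 by push_cast; ring,
      PySem.List.pyRange_one_succ_right (by positivity), List.foldl_append,
      ih (by omega)]
    simp only [List.foldl_cons, List.foldl_nil]
    have h1 : xs[k + 1]? = some xs[k + 1] := List.getElem?_eq_getElem hk
    rw [show ((k : Int) + 1) = (((k + 1 : Nat)) : Int) by push_cast; ring,
      PySem.List.pyGetD_natCast, List.take_add_one (i := k + 1), List.sum_append]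
    simp [h1, List.getD_eq_getElem?_getD]

theorem per_query (cc : List Int) (t d c : Int) (h0 : 0 ≤ t) (h1 : t < (cc.length : Int)) :
    canEat_can (pyAccumulate 0 cc) t d c =
      (decide (d + 1 ≤ (PySem.List.pyRange 0 (t + 1) 1).foldl
          (fun s i => s + PySem.List.pyGetD cc i 0) 0) &&
       decide ((d + 1) * c ≥
          (if 1 ≤ t then
            (PySem.List.pyRange 0 (t + 1) 1).foldl (fun s i => s + PySem.List.pyGetD cc i 0) 0
              - PySem.List.pyGetD cc t 0 + 1
           else 0))) := by
  obtain ⟨k, rfl⟩ : ∃ k : Nat, t = (k : Int) := ⟨t.toNat, (Int.toNat_of_nonneg h0).symm⟩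
  have hk : k < cc.length := by exact_mod_cast h1
  have hsum := scan_sum cc k hk
  have hmax : PySem.List.pyGetD (pyAccumulate 0 cc) (k : Int) 0 = (cc.take (k + 1)).sum := by
    rw [PySem.List.pyGetD_natCast, pyAccumulate_getD 0 cc k hk, zero_add]
  unfold canEat_can
  rw [hsum, hmax]
  by_cases hk1 : 1 ≤ (k : Int)
  · have hk1' : 1 ≤ k := by exact_mod_cast hk1
    have hmin : PySem.List.pyGetD (pyAccumulate 0 cc) ((k : Int) - 1) 0 = (cc.take k).sum := by
      rw [show ((k : Int) - 1) = ((k - 1 : Nat) : Int) by omega, PySem.List.pyGetD_natCast,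
        pyAccumulate_getD 0 cc (k - 1) (by omega), zero_add, Nat.sub_add_cancel hk1']
    have hgk : PySem.List.pyGetD cc (k : Int) 0 = cc[k] := by
      rw [PySem.List.pyGetD_natCast]
      simp [List.getD_eq_getElem?_getD, List.getElem?_eq_getElem hk]
    have htake : (cc.take (k + 1)).sum = (cc.take k).sum + cc[k] := by
      rw [List.take_add_one, List.sum_append, List.getElem?_eq_getElem hk]
      simp
    simp only [if_pos hk1, hmin, hgk, htake]
    ring_nf
  · simp only [if_neg hk1]

theorem foldl_append_bools (qs : List (List Int)) (f : List Int → Bool) (init : List Bool) :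
    qs.foldl (fun results q => results ++ [f q]) init = init ++ qs.map f := by
  induction qs generalizing init with
  | nil => simp
  | cons q qs ih => simp [ih]

-- ===== VERDICT (by name: the statement is the Claim_ definition above) =====
theorem canEat_spec : Claim_equal_canEat := by
  intro cc qs _ hpre
  unfold Spec_canEat canEat canEat_alt
  rw [foldl_append_bools qs _ []]
  simp only [List.nil_append]
  apply List.map_congr_left
  intro q hq
  obtain ⟨hlen, h0, h1⟩ := hpre q hq
  have hget : PySem.List.pyGetD q 0 0 = q.getD 0 0 := by
    simpa using PySem.List.pyGetD_natCast q 0 0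
  rw [per_query cc _ _ _ (by rw [hget]; exact h0) (by rw [hget]; exact h1)]
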